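-- pv_equiv track=rewrite | github.com/LeoPlix/Orbital-Strategy-Game-in-Python | FP2425P2.py | conta_consecutivos
-- ===== SOURCE A (Python) =====
-- def conta_consecutivos(tuplo, pedra):
--     """
--     Função auxiliar que conta o número de pedras consecutivas nas posicoes dadas, considerando a posição principal.
--     tuplo x pedra → int
--     """
--     contador = 0
--     cont_max = 0
--
--     for pos, valor in tuplo:
--         if valor == pedra:
--             contador += 1
--             cont_max = max(cont_max, contador)   #Atualiza o contador máximo
--         else:
--             contador = 0  #Reinicia o contador
--
--     return cont_max
-- ===== SOURCE B (Python) =====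
-- def conta_consecutivos(tuplo, pedra):
--     """Run-segmentation: split tuplo into maximal runs of equal match-status,
--     collect lengths of the matching runs, return the largest (0 if none)."""
--     def runs(l):
--         out = []
--         rest = l
--         while rest:
--             k = rest[0][1] == pedra
--             i = 1
--             while i < len(rest) and (rest[i][1] == pedra) == k:
--                 i += 1
--             if k:
--                 out.append(i)
--             rest = rest[i:]
--         return out
--     return max(runs(tuplo), default=0)
-- ===== Notes on version B (the rewrite author's own statement) =====
-- stated objective: alternative
-- what changed: Replaces the single-pass running counter with cont_max by segmenting the sequence into maximal runs of equal match-status, collecting the lengths of the matching runs and taking their maximum (default 0).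
import Mathlib
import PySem

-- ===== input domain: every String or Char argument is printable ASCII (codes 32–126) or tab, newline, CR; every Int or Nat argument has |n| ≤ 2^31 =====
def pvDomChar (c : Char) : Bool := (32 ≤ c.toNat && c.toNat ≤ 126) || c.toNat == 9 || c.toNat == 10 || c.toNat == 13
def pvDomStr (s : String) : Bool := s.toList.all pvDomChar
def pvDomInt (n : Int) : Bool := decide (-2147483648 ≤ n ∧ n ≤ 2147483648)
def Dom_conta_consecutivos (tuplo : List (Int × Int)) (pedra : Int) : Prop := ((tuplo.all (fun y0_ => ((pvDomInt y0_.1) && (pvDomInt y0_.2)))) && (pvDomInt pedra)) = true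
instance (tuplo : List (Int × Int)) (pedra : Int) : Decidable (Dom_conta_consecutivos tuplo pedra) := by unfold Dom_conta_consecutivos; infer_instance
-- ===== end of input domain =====

-- B segments the list into maximal runs instead of threading a running counter; same cost, different decomposition.

-- ===== PORT A =====
-- A's loop over (pos, valor) with state (contador, cont_max)
def contaLoop (pedra : Int) : List (Int × Int) → Int → Int → Int
  | [], _, m => m
  | (_, v) :: t, c, m =>
      if v = pedra then contaLoop pedra t (c + 1) (max m (c + 1))
      else contaLoop pedra t 0 m

def conta_consecutivos (tuplo : List (Int × Int)) (pedra : Int) : Int :=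
  contaLoop pedra tuplo 0 0

-- ===== PORT B =====
-- lengths of the maximal matching runs (Source B's inner `runs`: peel one maximal
-- run of equal match-status at a time, record its length if it matches)
def pvRuns (pedra : Int) (l : List (Int × Int)) : List Int :=
  match l with
  | [] => []
  | x :: t =>
      let k : Bool := x.2 == pedra
      let g := t.takeWhile (fun y => (y.2 == pedra) == k)
      let r := t.dropWhile (fun y => (y.2 == pedra) == k)
      (if k then [((g.length : Int) + 1)] else []) ++ pvRuns pedra r
  termination_by l.length
  decreasing_by
    simp only [List.length_cons]
    exact Nat.lt_succ_of_le (List.length_dropWhile_le _ _)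

def conta_consecutivos_alt (tuplo : List (Int × Int)) (pedra : Int) : Int :=
  (pvRuns pedra tuplo).foldl max 0

-- ===== PRECONDITION & SPEC =====
def Spec_conta_consecutivos (tuplo : List (Int × Int)) (pedra : Int) (out : Int) : Prop := out = conta_consecutivos_alt tuplo pedra
instance (tuplo : List (Int × Int)) (pedra : Int) (out : Int) : Decidable (Spec_conta_consecutivos tuplo pedra out) := by unfold Spec_conta_consecutivos; infer_instance

-- ===== CLAIM (what is proved, stated in full; the proofs are below) =====
def Claim_equal_conta_consecutivos : Prop := ∀ (tuplo : List (Int × Int)) (pedra : Int), Dom_conta_consecutivos tuplo pedra → Spec_conta_consecutivos tuplo pedra (conta_consecutivos tuplo pedra)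

-- ===== LEMMAS AND PROOFS =====

-- head of dropWhile fails the predicate
lemma pvHead?_dropWhile_false {α : Type} (p : α → Bool) (l : List α) (x : α)
    (h : (l.dropWhile p).head? = some x) : p x = false := by
  induction l with
  | nil => simp [List.dropWhile] at h
  | cons a t ih =>
      rw [List.dropWhile_cons] at h
      by_cases hp : p a
      · rw [if_pos hp] at h; exact ih h
      · rw [if_neg hp] at h
        simp only [List.head?_cons, Option.some.injEq] at h
        subst h; simpa using hp

-- running A's loop through a fully matching block g
lemma contaLoop_match (pedra : Int) (g : List (Int × Int))
    (h : ∀ x ∈ g, x.2 = pedra) (r : List (Int × Int)) (c m : Int) (hcm : c ≤ m) :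
    contaLoop pedra (g ++ r) c m
      = contaLoop pedra r (c + g.length) (max m (c + g.length)) := by
  induction g generalizing c m with
  | nil => simp [max_eq_left hcm]
  | cons x t ih =>
      have hx : x.2 = pedra := h x (List.mem_cons_self ..)
      have ht : ∀ y ∈ t, y.2 = pedra := fun y hy => h y (List.mem_cons_of_mem _ hy)
      have hL : (0 : Int) ≤ (t.length : Int) := Int.natCast_nonneg _
      simp only [List.cons_append, contaLoop, hx, if_pos]
      rw [ih ht (c + 1) (max m (c + 1)) (le_max_right _ _)]
      have e2 : max (max m (c + 1)) (c + 1 + (t.length : Int))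
          = max m (c + 1 + (t.length : Int)) := by
        rw [max_assoc, max_eq_right (by omega : c + 1 ≤ c + 1 + (t.length : Int))]
      rw [e2]
      have e1 : c + 1 + (t.length : Int) = c + (((x :: t).length : Int)) := by
        simp only [List.length_cons, Nat.cast_add, Nat.cast_one]; ring
      rw [e1]

-- running A's loop through a fully non-matching block g (counter stays reset)
lemma contaLoop_nomatch (pedra : Int) (g : List (Int × Int))
    (h : ∀ x ∈ g, x.2 ≠ pedra) (r : List (Int × Int)) (m : Int) :
    contaLoop pedra (g ++ r) 0 m = contaLoop pedra r 0 m := by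
  induction g with
  | nil => simp
  | cons x t ih =>
      have hx : x.2 ≠ pedra := h x (List.mem_cons_self ..)
      simp only [List.cons_append, contaLoop, if_neg hx]
      exact ih (fun y hy => h y (List.mem_cons_of_mem _ hy))

-- the counter value is irrelevant when the next stone does not match
lemma contaLoop_reset (pedra : Int) (r : List (Int × Int))
    (h : ∀ x ∈ r.head?, x.2 ≠ pedra) (c m : Int) :
    contaLoop pedra r c m = contaLoop pedra r 0 m := by
  cases r with
  | nil => rfl
  | cons x t =>
      have hx : x.2 ≠ pedra := h x rfl
      simp [contaLoop, if_neg hx]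

-- main invariant: A's loop from a reset counter computes the fold of B's run lengths
lemma contaLoop_eq_runs (pedra : Int) :
    ∀ n (l : List (Int × Int)), l.length ≤ n → ∀ m, 0 ≤ m →
      contaLoop pedra l 0 m = (pvRuns pedra l).foldl max m := by
  intro n
  induction n with
  | zero =>
      intro l hl m _
      have : l = [] := List.eq_nil_of_length_eq_zero (Nat.le_zero.mp hl)
      subst this; simp [contaLoop, pvRuns]
  | succ n ih =>
      intro l hl m hm
      match l with
      | [] => simp [contaLoop, pvRuns]
      | x :: t =>
          have ht : t.length ≤ n := by simpa using Nat.succ_le_succ_iff.mp hl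
          by_cases hx : x.2 = pedra
          · -- matching run: x :: takeWhile, then the rest
            set p : Int × Int → Bool := fun y => (y.2 == pedra) == (x.2 == pedra) with hp
            have hk : (x.2 == pedra) = true := beq_iff_eq.mpr hx
            have hsplit : x :: t = (x :: t.takeWhile p) ++ t.dropWhile p := by
              simp [List.takeWhile_append_dropWhile]
            have hall : ∀ y ∈ x :: t.takeWhile p, y.2 = pedra := by
              intro y hy
              rcases List.mem_cons.mp hy with h1 | h1
              · subst h1; exact hx
              · have := List.mem_takeWhile_imp h1
                simp only [hp, hk] at this
                simpa using this
            have hhead : ∀ y ∈ (t.dropWhile p).head?, y.2 ≠ pedra := by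
              intro y hy
              have hne := pvHead?_dropWhile_false p t y (Option.mem_def.mp hy)
              simp only [hp, hk] at hne
              simpa using hne
            have hlen : (t.dropWhile p).length ≤ n := by
              have := List.length_dropWhile_le p t
              omega
            have hL : (0 : Int) ≤ ((x :: t.takeWhile p).length : Int) :=
              Int.natCast_nonneg _
            conv_lhs => rw [hsplit]
            rw [contaLoop_match pedra _ hall _ 0 m hm,
                contaLoop_reset pedra _ hhead,
                ih _ hlen _ (by omega : (0:Int) ≤ max m (0 + ((x :: t.takeWhile p).length : Int)))]
            have hruns : pvRuns pedra (x :: t)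
                = (((t.takeWhile p).length : Int) + 1) :: pvRuns pedra (t.dropWhile p) := by
              rw [pvRuns]; simp [hp, hk]
            rw [hruns, List.foldl_cons]
            have e : (0 : Int) + ((x :: t.takeWhile p).length : Int)
                = ((t.takeWhile p).length : Int) + 1 := by simp only [List.length_cons, Nat.cast_add, Nat.cast_one]; ring
            rw [e]
          · -- non-matching run: the whole block vanishes
            set p : Int × Int → Bool := fun y => (y.2 == pedra) == (x.2 == pedra) with hp
            have hk : (x.2 == pedra) = false := beq_eq_false_iff_ne.mpr hx
            have hsplit : x :: t = (x :: t.takeWhile p) ++ t.dropWhile p := by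
              simp [List.takeWhile_append_dropWhile]
            have hall : ∀ y ∈ x :: t.takeWhile p, y.2 ≠ pedra := by
              intro y hy
              rcases List.mem_cons.mp hy with h1 | h1
              · subst h1; exact hx
              · have := List.mem_takeWhile_imp h1
                simp only [hp, hk] at this
                simpa using this
            have hlen : (t.dropWhile p).length ≤ n := by
              have := List.length_dropWhile_le p t
              omega
            conv_lhs => rw [hsplit]
            rw [contaLoop_nomatch pedra _ hall, ih _ hlen _ hm]
            have hruns : pvRuns pedra (x :: t) = pvRuns pedra (t.dropWhile p) := by
              rw [pvRuns]; simp [hp, hk]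
            rw [hruns]

-- ===== VERDICT (by name: the statement is the Claim_ definition above) =====
theorem conta_consecutivos_spec : Claim_equal_conta_consecutivos := by
  intro tuplo pedra _
  show contaLoop pedra tuplo 0 0 = (pvRuns pedra tuplo).foldl max 0
  exact contaLoop_eq_runs pedra tuplo.length tuplo le_rfl 0 le_rfl
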